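-- pv_equiv track=rewrite | github.com/takapdayon/atcoder | python/_abc/AtCoderBeginnerContest179/B.py | b179
-- ===== SOURCE A (Python) =====
-- def b179(n, dlist):
--
--     count = 0
--
--     for i in dlist:
--         if i[0] == i[1]:
--             count += 1
--         else:
--             count = 0
--         if 3 <= count:
--             return "Yes"
--
--     return "No"
-- ===== SOURCE B (Python) =====
-- def b179(n, dlist):
--     flags = [a == b for a, b in dlist]
--     if any(flags[i] and flags[i + 1] and flags[i + 2] for i in range(len(flags) - 2)):
--         return "Yes"
--     return "No"
-- ===== Notes on version B (the rewrite author's own statement) =====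
-- stated objective: alternative
-- what changed: Replaced the stateful running-counter early-exit scan with a two-stage map-then-window scan: precompute a boolean flags list, then check whether any 3 consecutive flags are all True.
import Mathlib
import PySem

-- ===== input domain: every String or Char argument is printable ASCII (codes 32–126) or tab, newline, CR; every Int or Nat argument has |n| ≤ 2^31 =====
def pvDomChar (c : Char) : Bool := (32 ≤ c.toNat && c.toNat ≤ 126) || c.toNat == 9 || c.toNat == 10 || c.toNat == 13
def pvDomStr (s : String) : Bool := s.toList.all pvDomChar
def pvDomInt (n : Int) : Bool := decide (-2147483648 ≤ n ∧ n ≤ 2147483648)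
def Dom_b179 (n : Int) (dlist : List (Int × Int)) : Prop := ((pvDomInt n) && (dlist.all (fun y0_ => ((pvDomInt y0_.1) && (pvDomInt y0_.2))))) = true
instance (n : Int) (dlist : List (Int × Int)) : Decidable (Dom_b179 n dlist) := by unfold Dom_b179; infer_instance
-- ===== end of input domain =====

-- B replaces A's running-counter early-exit scan by precomputing a boolean flags list
-- and checking any window of 3 consecutive True flags (alternative decomposition, same cost).

-- ===== PORT A =====
-- the for-loop with its early return, as structural recursion over dlist carrying count
def b179Go (dlist : List (Int × Int)) (count : Int) : String :=
  match dlist with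
  | [] => "No"
  | i :: rest =>
    let count' := if i.1 == i.2 then count + 1 else 0
    if 3 ≤ count' then "Yes" else b179Go rest count'

def b179 (n : Int) (dlist : List (Int × Int)) : String := b179Go dlist 0

-- ===== PORT B =====
def b179_alt (n : Int) (dlist : List (Int × Int)) : String :=
  let flags := dlist.map (fun p => p.1 == p.2)
  if (List.range (flags.length - 2)).any
      (fun i => flags.getD i false && flags.getD (i + 1) false && flags.getD (i + 2) false)
  then "Yes" else "No"

-- ===== PRECONDITION & SPEC =====
def Spec_b179 (n : Int) (dlist : List (Int × Int)) (out : String) : Prop := out = b179_alt n dlist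
instance (n : Int) (dlist : List (Int × Int)) (out : String) : Decidable (Spec_b179 n dlist out) := by unfold Spec_b179; infer_instance

-- ===== CLAIM (what is proved, stated in full; the proofs are below) =====
def Claim_equal_b179 : Prop := ∀ (n : Int) (dlist : List (Int × Int)), Dom_b179 n dlist → Spec_b179 n dlist (b179 n dlist)

-- ===== LEMMAS AND PROOFS =====

-- "the first k flags exist and are all true"
def prefT : List Bool → Nat → Bool
  | _, 0 => true
  | [], _ + 1 => false
  | b :: bs, k + 1 => b && prefT bs k

-- "some window of 3 consecutive flags is all true", structural form
def winT : List Bool → Bool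
  | [] => false
  | b :: bs => prefT (b :: bs) 3 || winT bs

theorem pref_mono : ∀ (l : List Bool) (k m : Nat), k ≤ m → (prefT l k || prefT l m) = prefT l k := by
  intro l
  induction l with
  | nil =>
    intro k m hkm
    match k, m with
    | 0, _ => simp [prefT]
    | k + 1, m + 1 => simp [prefT]
  | cons b bs ih =>
    intro k m hkm
    match k, m with
    | 0, _ => simp [prefT]
    | k + 1, m + 1 =>
      simp only [prefT, ← Bool.and_or_distrib_left]
      rw [ih k m (by omega)]

theorem pref_or_win : ∀ (l : List Bool), (prefT l 3 || winT l) = winT l := by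
  intro l
  cases l with
  | nil => simp [prefT, winT]
  | cons b bs => simp [winT, Bool.or_assoc]

-- A's scan, characterised through prefT/winT on the flags list
theorem go_char : ∀ (l : List (Int × Int)) (c : Int), 0 ≤ c → c ≤ 2 →
    b179Go l c =
      (if (prefT (l.map (fun p => p.1 == p.2)) (3 - c).toNat
            || winT (l.map (fun p => p.1 == p.2))) then "Yes" else "No") := by
  intro l
  induction l with
  | nil =>
    intro c h0 h2
    have hk : (3 - c).toNat = (2 - c).toNat + 1 := by omega
    simp [b179Go, hk, prefT, winT]
  | cons x xs ih =>
    intro c h0 h2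
    by_cases hf : x.1 == x.2
    · by_cases hc : c = 2
      · subst hc
        have hk : ((3 : Int) - 2).toNat = 1 := by norm_num
        simp [b179Go, hf, prefT]
      · have hlt : ¬ (3 ≤ c + 1) := by omega
        have hk : (3 - c).toNat = (2 - c).toNat + 1 := by omega
        have hk2 : (3 - (c + 1)).toNat = (2 - c).toNat := by omega
        rw [show b179Go (x :: xs) c = b179Go xs (c + 1) by
          simp [b179Go, hf, hlt]]
        rw [ih (c + 1) (by omega) (by omega)]
        simp only [List.map_cons, hk, prefT, hf, Bool.true_and, winT, hk2]
        have hle : (2 - c).toNat ≤ 2 := by omega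
        -- reorganise ors via pref_mono with k = (2-c).toNat, m = 2
        cases hp2 : prefT (xs.map (fun p => p.1 == p.2)) 2 with
        | true =>
          have := pref_mono (xs.map (fun p => p.1 == p.2)) (2 - c).toNat 2 hle
          rw [hp2] at this
          simp only [Bool.or_true] at this
          simp [this]
        | false => simp [hp2]
    · have hlt : ¬ ((3 : Int) ≤ 0) := by omega
      have hk : (3 - c).toNat = (2 - c).toNat + 1 := by omega
      rw [show b179Go (x :: xs) c = b179Go xs 0 by simp [b179Go, hf, hlt]]
      rw [ih 0 (by omega) (by omega)]
      simp only [List.map_cons, hk, prefT, hf, Bool.false_and, Bool.false_or, winT]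
      have h3 : ((3 : Int) - 0).toNat = 3 := by decide
      rw [h3, pref_or_win]

-- B's index-window any equals the structural winT
theorem range_win : ∀ (fl : List Bool),
    ((List.range (fl.length - 2)).any
      (fun i => fl.getD i false && fl.getD (i + 1) false && fl.getD (i + 2) false)) = winT fl := by
  intro fl
  induction fl with
  | nil => simp [winT]
  | cons a rest ih =>
    match rest, ih with
    | [], _ => simp [winT, prefT, List.range]
    | [b], _ => simp [winT, prefT, List.range]
    | b :: c :: xs, ih =>
      have hlen : (a :: b :: c :: xs).length - 2 = ((b :: c :: xs).length - 2) + 1 := by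
        simp
      rw [hlen, List.range_succ_eq_map, List.any_cons, List.any_map]
      have hg : ((fun i => (a :: b :: c :: xs).getD i false
              && (a :: b :: c :: xs).getD (i + 1) false
              && (a :: b :: c :: xs).getD (i + 2) false) ∘ Nat.succ)
          = (fun i => (b :: c :: xs).getD i false
              && (b :: c :: xs).getD (i + 1) false
              && (b :: c :: xs).getD (i + 2) false) := by
        funext i
        simp only [Function.comp_apply, Nat.succ_eq_add_one]
        have e3 : i + 1 + 2 = (i + 2) + 1 := by omega
        rw [e3]
        simp only [List.getD_cons_succ]
      rw [hg, ih]
      simp [winT, prefT, Bool.and_assoc]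

-- ===== VERDICT (by name: the statement is the Claim_ definition above) =====
theorem b179_spec : Claim_equal_b179 := by
  intro n dlist _
  show b179 n dlist = b179_alt n dlist
  rw [b179, b179_alt, go_char dlist 0 (by norm_num) (by norm_num)]
  have h3 : ((3 : Int) - 0).toNat = 3 := by decide
  rw [h3, pref_or_win, range_win]
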